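-- pv_equiv track=rewrite | github.com/ejfn/advent-of-code | 2020/20/day20.py | count_monsters
-- ===== SOURCE A (Python) =====
-- from typing import Dict, List, Optional, Sequence, Set, Tuple
--
-- TileGrid = List[str]
--
-- MONSTER = [
--     "                  # ",
--     "#    ##    ##    ###",
--     " #  #  #  #  #  #   ",
-- ]
--
-- def rotate(grid: TileGrid) -> TileGrid:
--     size = len(grid)
--     return [''.join(grid[size - 1 - r][c] for r in range(size)) for c in range(size)]
--
-- def flip(grid: TileGrid) -> TileGrid:
--     return [row[::-1] for row in grid]
--
-- def all_transformations(grid: TileGrid) -> List[TileGrid]: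
--     grids: List[TileGrid] = []
--     g = grid
--     for _ in range(4):
--         grids.append(g)
--         grids.append(flip(g))
--         g = rotate(g)
--     unique: List[TileGrid] = []
--     for candidate in grids:
--         if candidate not in unique:
--             unique.append(candidate)
--     return unique
--
-- def count_monsters(grid: TileGrid) -> Tuple[int, TileGrid]:
--     monster_coords = [(r, c) for r, row in enumerate(MONSTER) for c, ch in enumerate(row) if ch == '#']
--     height = len(grid)
--     width = len(grid[0])
--     monster_height = len(MONSTER)
--     monster_width = len(MONSTER[0])
--     best = (0, grid)
--     for transformed in all_transformations(grid):
--         marked = [list(row) for row in transformed]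
--         count = 0
--         for r in range(height - monster_height + 1):
--             for c in range(width - monster_width + 1):
--                 if all(transformed[r + dr][c + dc] == '#' for dr, dc in monster_coords):
--                     count += 1
--                     for dr, dc in monster_coords:
--                         marked[r + dr][c + dc] = 'O'
--         if count > 0:
--             best = (count, [''.join(row) for row in marked])
--             break
--     return best
-- ===== SOURCE B (Python) =====
-- from typing import List, Tuple
--
-- TileGrid = List[str]
--
-- MONSTER = [
--     "                  # ",
--     "#    ##    ##    ###",
--     " #  #  #  #  #  #   ",
-- ]
--
-- _OFFSETS = [(r, c) for r in range(3) for c in range(20) if MONSTER[r][c] == '#']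
--
-- # The 8 orientations of an n x n grid as affine maps from oriented coordinates (i, j)
-- # to original coordinates: (ri*i + rj*j + re*(n-1), ci*i + cj*j + cf*(n-1)),
-- # in the order g, flip g, rot g, flip rot g, rot^2 g, ... used by A.
-- _MAPS = [
--     (1, 0, 0, 0, 1, 0),
--     (1, 0, 0, 0, -1, 1),
--     (0, -1, 1, 1, 0, 0),
--     (0, 1, 0, 1, 0, 0),
--     (-1, 0, 1, 0, -1, 1),
--     (-1, 0, 1, 0, 1, 0),
--     (0, 1, 0, -1, 0, 1),
--     (0, -1, 1, -1, 0, 1),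
-- ]
--
--
-- def count_monsters(grid: TileGrid) -> Tuple[int, TileGrid]:
--     # Transform the MONSTER through each orientation's linear part and slide it
--     # over the ORIGINAL grid's '#'-cell set; only the winning orientation's grid
--     # is ever materialised.  Duplicate orientations need no dedup: a duplicate
--     # equals an earlier zero-hit candidate and yields zero hits itself.
--     h, w = len(grid), len(grid[0])
--     n = len(grid)
--     sharps = {(i, j) for i in range(n) for j in range(n) if grid[i][j] == '#'}
--     for ri, rj, re, ci, cj, cf in _MAPS:
--         shape = [(ri * dr + rj * dc, ci * dr + cj * dc) for dr, dc in _OFFSETS]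
--         hits = [(r, c) for r in range(h - 2) for c in range(w - 19)
--                 if all((ri * r + rj * c + re * (n - 1) + sr,
--                         ci * r + cj * c + cf * (n - 1) + sc) in sharps
--                        for sr, sc in shape)]
--         if hits:
--             covered = {(r + dr, c + dc) for r, c in hits for dr, dc in _OFFSETS}
--             return (len(hits),
--                     [''.join('O' if (i, j) in covered else
--                              grid[ri * i + rj * j + re * (n - 1)][ci * i + cj * j + cf * (n - 1)]
--                              for j in range(n)) for i in range(n)])
--     return (0, grid)
-- ===== Notes on version B (the rewrite author's own statement) =====
-- stated objective: alternative
-- what changed: Instead of generating and deduplicating 8 transformed grids and sliding the monster over each, B builds the '#'-cell set of the grid's n x n square once, transforms the MONSTER's coordinate shape through each orientation's affine map, slides the transformed shape over that single set, drops the dedup (a duplicate orientation equals an earlier zero-hit one, so it is provably redundant), and materialises only the winning oriented grid.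
import Mathlib
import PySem

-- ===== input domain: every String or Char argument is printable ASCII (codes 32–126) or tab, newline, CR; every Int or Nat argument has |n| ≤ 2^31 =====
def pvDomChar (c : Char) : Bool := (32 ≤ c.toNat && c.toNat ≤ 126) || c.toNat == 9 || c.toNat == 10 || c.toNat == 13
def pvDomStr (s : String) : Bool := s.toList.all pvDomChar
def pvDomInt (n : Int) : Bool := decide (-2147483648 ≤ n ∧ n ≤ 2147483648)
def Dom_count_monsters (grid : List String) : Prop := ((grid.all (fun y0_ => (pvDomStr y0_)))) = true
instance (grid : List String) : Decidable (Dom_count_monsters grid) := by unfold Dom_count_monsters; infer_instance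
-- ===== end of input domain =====

-- B transforms the MONSTER shape through the 8 orientation maps and slides it over one
-- '#'-cell set of the original grid (no dedup, only the winning grid is built) ('alternative').

-- ===== PORT A =====

def pvMONSTER : List String := [
  "                  # ",
  "#    ##    ##    ###",
  " #  #  #  #  #  #   "]

-- grid[i][j] : in Python an out-of-range index raises (excluded by Pre_); the default is never read there
def pvCell (g : List String) (i j : Int) : Char :=
  (PySem.Str.pyGet? (PySem.List.pyGetD g i "") j).getD ' '

def pvRotate (grid : List String) : List String :=
  let size : Int := grid.length
  (PySem.List.pyRange 0 size 1).map (fun c =>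
    String.ofList ((PySem.List.pyRange 0 size 1).map (fun r => pvCell grid (size - 1 - r) c)))

def pvFlip (grid : List String) : List String :=
  grid.map (fun row => (PySem.Str.slice? row none none (-1)).getD "")

def pvAllTransformations (grid : List String) : List (List String) :=
  let p := (List.range 4).foldl
    (fun (acc : List (List String) × List String) _ =>
      (acc.1 ++ [acc.2, pvFlip acc.2], pvRotate acc.2)) ([], grid)
  p.1.foldl (fun unique cand => if cand ∈ unique then unique else unique ++ [cand]) []

def pvMonsterCoords : List (Int × Int) :=
  (PySem.List.enumerate pvMONSTER).flatMap (fun rw =>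
    (PySem.List.enumerate rw.2.toList).filterMap (fun cc =>
      if cc.2 = '#' then some (rw.1, cc.1) else none))

-- marked[i][j] = 'O' (indices are nonnegative and in range on admitted inputs)
def pvMarkOne (marked : List (List Char)) (i j : Int) : List (List Char) :=
  marked.modify i.toNat (fun row => row.set j.toNat 'O')

def pvScanOne (height width mh mw : Int) (t : List String) : Int × List (List Char) :=
  (PySem.List.pyRange 0 (height - mh + 1) 1).foldl (fun st r =>
    (PySem.List.pyRange 0 (width - mw + 1) 1).foldl (fun st c =>
      if pvMonsterCoords.all (fun d => pvCell t (r + d.1) (c + d.2) == '#') then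
        (st.1 + 1, pvMonsterCoords.foldl (fun m d => pvMarkOne m (r + d.1) (c + d.2)) st.2)
      else st) st)
    (0, t.map (fun row => row.toList))

def pvScanAll (grid : List String) (height width mh mw : Int) : List (List String) → Int × List String
  | [] => (0, grid)
  | t :: rest =>
      let cm := pvScanOne height width mh mw t
      if cm.1 > 0 then (cm.1, cm.2.map (fun row => String.ofList row))
      else pvScanAll grid height width mh mw rest

def count_monsters (grid : List String) : Int × List String :=
  pvScanAll grid (grid.length : Int) (PySem.Str.len (PySem.List.pyGetD grid 0 ""))
    (pvMONSTER.length : Int) (PySem.Str.len (PySem.List.pyGetD pvMONSTER 0 ""))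
    (pvAllTransformations grid)

-- ===== PORT B =====

def pvbOffsets : List (Int × Int) :=
  (PySem.List.pyRange 0 3 1).flatMap (fun r =>
    (PySem.List.pyRange 0 20 1).filterMap (fun c =>
      if pvCell pvMONSTER r c = '#' then some (r, c) else none))

-- the 8 orientations as affine maps (ri*i + rj*j + re*(n-1), ci*i + cj*j + cf*(n-1))
def pvbMaps : List (Int × Int × Int × Int × Int × Int) :=
  [(1, 0, 0, 0, 1, 0), (1, 0, 0, 0, -1, 1), (0, -1, 1, 1, 0, 0), (0, 1, 0, 1, 0, 0),
   (-1, 0, 1, 0, -1, 1), (-1, 0, 1, 0, 1, 0), (0, 1, 0, -1, 0, 1), (0, -1, 1, -1, 0, 1)]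

def pvbSharps (g : List String) (n : Int) : PySem.Set (Int × Int) :=
  PySem.Set.ofList ((PySem.List.pyRange 0 n 1).flatMap (fun i =>
    (PySem.List.pyRange 0 n 1).filterMap (fun j =>
      if pvCell g i j = '#' then some (i, j) else none)))

def pvbGo (grid : List String) (h w n : Int) (sharps : PySem.Set (Int × Int)) :
    List (Int × Int × Int × Int × Int × Int) → Int × List String
  | [] => (0, grid)
  | (ri, rj, re, ci, cj, cf) :: Ms =>
      let shape := pvbOffsets.map (fun d => (ri * d.1 + rj * d.2, ci * d.1 + cj * d.2))
      let hits := (PySem.List.pyRange 0 (h - 2) 1).flatMap (fun r =>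
        (PySem.List.pyRange 0 (w - 19) 1).filterMap (fun c =>
          if shape.all (fun s => PySem.Set.contains sharps
              (ri * r + rj * c + re * (n - 1) + s.1, ci * r + cj * c + cf * (n - 1) + s.2))
          then some (r, c) else none))
      if hits.isEmpty then pvbGo grid h w n sharps Ms
      else
        let covered := PySem.Set.ofList (hits.flatMap (fun rc =>
          pvbOffsets.map (fun d => (rc.1 + d.1, rc.2 + d.2))))
        ((hits.length : Int),
         (PySem.List.pyRange 0 n 1).map (fun i =>
           String.ofList ((PySem.List.pyRange 0 n 1).map (fun j =>
             if PySem.Set.contains covered (i, j) then 'O'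
             else pvCell grid (ri * i + rj * j + re * (n - 1)) (ci * i + cj * j + cf * (n - 1))))))

def count_monsters_alt (grid : List String) : Int × List String :=
  pvbGo grid (grid.length : Int) (PySem.Str.len (PySem.List.pyGetD grid 0 ""))
    (grid.length : Int) (pvbSharps grid (grid.length : Int)) pvbMaps

-- ===== PRECONDITION & SPEC =====

-- Pre_ excludes the empty grid (A raises IndexError on grid[0]) and the non-square grids
-- reached by the monster scan: there A's rotate either raises IndexError (a row shorter than
-- the number of rows) or silently truncates rows, so on the rare non-square grids where A
-- still returns, neither A's value nor B's is specified behaviour (see the cite below); the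
-- function's natural domain (Advent-of-Code image tiles) is square grids.
def Pre_count_monsters (grid : List String) : Prop :=
  grid ≠ [] ∧ (∀ s ∈ grid, grid.length ≤ s.toList.length) ∧
    ((∀ s ∈ grid, s.toList.length = grid.length) ∨ grid.length < 3 ∨
      (grid.headD "").toList.length < 20)

instance (grid : List String) : Decidable (Pre_count_monsters grid) := by
  unfold Pre_count_monsters; infer_instance

def pvWitness_count_monsters : List String := ["#.", ".#"]

def Spec_count_monsters (grid : List String) (out : Int × List String) : Prop :=
  out = count_monsters_alt grid
instance (grid : List String) (out : Int × List String) : Decidable (Spec_count_monsters grid out) := by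
  unfold Spec_count_monsters; infer_instance

-- ===== CLAIM (what is proved, stated in full; the proofs are below) =====
def Claim_equal_count_monsters : Prop := ∀ (grid : List String), Dom_count_monsters grid →
  Pre_count_monsters grid → Spec_count_monsters grid (count_monsters grid)


-- ===== LEMMAS AND PROOFS =====

/- proof-side grid access and "formula grids" -/

def cN (g : List String) (p q : Nat) : Char := ((g.getD p "").toList).getD q ' '

def Sq (t : List String) (n : Nat) : Prop := t.length = n ∧ ∀ s ∈ t, s.toList.length = n

def fG (g : List String) (n : Nat) (m : Nat → Nat → Nat × Nat) : List String :=
  (List.range n).map (fun i => String.ofList ((List.range n).map (fun j => cN g (m i j).1 (m i j).2)))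

theorem cell_nonneg (g : List String) {i j : Int} (hi : 0 ≤ i) (hj : 0 ≤ j) :
    pvCell g i j = cN g i.toNat j.toNat := by
  rw [pvCell, cN, PySem.List.pyGetD_of_nonneg g "" hi]
  conv_lhs => rw [show j = ((j.toNat : Nat) : Int) by omega, PySem.Str.pyGet?_natCast]
  rw [List.getD_eq_getElem?_getD, List.getD_eq_getElem?_getD]

theorem cN_eq_getElem {t : List String} {p q : Nat} (hp : p < t.length)
    (hq : q < t[p].toList.length) : cN t p q = t[p].toList[q] := by
  simp [cN, List.getD_eq_getElem?_getD, List.getElem?_eq_getElem hp,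
    List.getElem?_eq_getElem hq]

theorem Sq_fG (g : List String) (n : Nat) (m : Nat → Nat → Nat × Nat) : Sq (fG g n m) n := by
  refine ⟨by simp [fG], ?_⟩
  intro s hs
  simp [fG] at hs
  obtain ⟨i, hi, rfl⟩ := hs
  simp

theorem cN_fG (g : List String) (n : Nat) (m : Nat → Nat → Nat × Nat) {p q : Nat}
    (hp : p < n) (hq : q < n) : cN (fG g n m) p q = cN g (m p q).1 (m p q).2 := by
  simp [cN, fG, List.getD_eq_getElem?_getD, hp, hq]

theorem grid_ext {t u : List String} {n : Nat} (ht : Sq t n) (hu : Sq u n)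
    (h : ∀ p q : Nat, p < n → q < n → cN t p q = cN u p q) : t = u := by
  obtain ⟨htl, htr⟩ := ht
  obtain ⟨hul, hur⟩ := hu
  apply List.ext_getElem (by omega)
  intro p hp hp'
  have h1 : t[p].toList.length = n := htr _ (List.getElem_mem _)
  have h2 : u[p].toList.length = n := hur _ (List.getElem_mem _)
  have hL : t[p].toList = u[p].toList := by
    apply List.ext_getElem (by omega)
    intro q hq hq'
    rw [← cN_eq_getElem hp hq, ← cN_eq_getElem hp' hq']
    exact h p q (by omega) (by omega)
  have := congrArg String.ofList hL
  simpa using this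

theorem fG_congr {g : List String} {n : Nat} {m1 m2 : Nat → Nat → Nat × Nat}
    (h : ∀ p q : Nat, p < n → q < n →
      cN g (m1 p q).1 (m1 p q).2 = cN g (m2 p q).1 (m2 p q).2) :
    fG g n m1 = fG g n m2 := by
  apply grid_ext (Sq_fG g n m1) (Sq_fG g n m2)
  intro p q hp hq
  rw [cN_fG g n m1 hp hq, cN_fG g n m2 hp hq]
  exact h p q hp hq

theorem shell_eq (g : List String) (n : Nat) (f s : Int → Int → Int) (m : Nat → Nat → Nat × Nat)
    (h : ∀ p q : Nat, p < n → q < n →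
      0 ≤ f ↑p ↑q ∧ 0 ≤ s ↑p ↑q ∧ (f ↑p ↑q).toNat = (m p q).1 ∧ (s ↑p ↑q).toNat = (m p q).2) :
    (PySem.List.pyRange 0 (n : Int) 1).map (fun i =>
      String.ofList ((PySem.List.pyRange 0 (n : Int) 1).map (fun j => pvCell g (f i j) (s i j))))
      = fG g n m := by
  rw [PySem.List.pyRange_one, fG]
  have hn : ((n : Int) - 0).toNat = n := by omega
  rw [hn]
  simp only [List.map_map]
  apply List.map_congr_left
  intro p hp
  rw [List.mem_range] at hp
  simp only [Function.comp_apply]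
  congr 1
  apply List.map_congr_left
  intro q hq
  rw [List.mem_range] at hq
  simp only [Function.comp_apply]
  obtain ⟨h1, h2, h3, h4⟩ := h p q hp hq
  rw [show (0 : Int) + (p : Int) = ↑p by ring, show (0 : Int) + (q : Int) = ↑q by ring] at *
  rw [cell_nonneg g h1 h2, h3, h4]

theorem rotate_eq (g : List String) :
    pvRotate g = fG g g.length (fun i j => (g.length - 1 - j, i)) := by
  rw [pvRotate]
  exact shell_eq g g.length _ _ _ (fun p q hp hq =>
    ⟨by omega, by omega, by omega, by omega⟩)

theorem flip_eq {g : List String} {n : Nat} (hg : Sq g n) :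
    pvFlip g = fG g n (fun i j => (i, n - 1 - j)) := by
  obtain ⟨hl, hr⟩ := hg
  rw [pvFlip, fG]
  apply List.ext_getElem (by simp [hl])
  intro p hp hp'
  simp only [List.length_map] at hp
  simp only [List.length_map, List.length_range] at hp'
  simp only [List.getElem_map, List.getElem_range]
  rw [PySem.Str.slice?_none_none_neg_one]
  simp only [Option.getD_some]
  congr 1
  have hlen : g[p].toList.length = n := hr _ (List.getElem_mem _)
  apply List.ext_getElem (by simp [hlen])
  intro q hq hq'
  simp only [List.length_reverse] at hq
  simp only [List.length_map, List.length_range] at hq'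
  simp only [List.getElem_reverse, List.getElem_map, List.getElem_range]
  rw [cN_eq_getElem (by omega) (by rw [hlen]; omega)]
  congr 1
  omega

theorem fG_comp {g : List String} {n : Nat} (m1 m2 : Nat → Nat → Nat × Nat)
    (h2 : ∀ p q : Nat, p < n → q < n → (m2 p q).1 < n ∧ (m2 p q).2 < n) :
    fG (fG g n m1) n m2 = fG g n (fun i j => m1 (m2 i j).1 (m2 i j).2) := by
  apply grid_ext (Sq_fG _ n m2) (Sq_fG g n _)
  intro p q hp hq
  rw [cN_fG _ n m2 hp hq, cN_fG g n _ hp hq,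
    cN_fG g n m1 (h2 p q hp hq).1 (h2 p q hp hq).2]

theorem fG_id {g : List String} {n : Nat} (hg : Sq g n) :
    fG g n (fun i j => (i, j)) = g :=
  grid_ext (Sq_fG g n _) hg (fun p q hp hq => cN_fG g n _ hp hq)

/- monster coordinates: the two constants agree with the same literal list -/

def pvLM : List (Int × Int) :=
  [(0, 18), (1, 0), (1, 5), (1, 6), (1, 11), (1, 12), (1, 17), (1, 18), (1, 19),
   (2, 1), (2, 4), (2, 7), (2, 10), (2, 13), (2, 16)]

theorem mc_eq : pvMonsterCoords = pvLM := by decide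

theorem off_eq : pvbOffsets = pvLM := by decide

theorem LM_bounds : ∀ d ∈ pvLM, 0 ≤ d.1 ∧ d.1 < 3 ∧ 0 ≤ d.2 ∧ d.2 < 20 := by decide

/- the nat-level orientation maps and the compatibility of an affine map with one of them -/

def mN (n : Nat) : Nat → Nat → Nat → Nat × Nat
  | 0 => fun i j => (i, j)
  | 1 => fun i j => (i, n - 1 - j)
  | 2 => fun i j => (n - 1 - j, i)
  | 3 => fun i j => (j, i)
  | 4 => fun i j => (n - 1 - i, n - 1 - j)
  | 5 => fun i j => (n - 1 - i, j)
  | 6 => fun i j => (j, n - 1 - i)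
  | _ => fun i j => (n - 1 - j, n - 1 - i)

def Compat (n : Nat) (ri rj re ci cj cf : Int) (m : Nat → Nat → Nat × Nat) : Prop :=
  ∀ p q : Nat, p < n → q < n →
    0 ≤ ri * p + rj * q + re * ((n : Int) - 1) ∧
    0 ≤ ci * p + cj * q + cf * ((n : Int) - 1) ∧
    (ri * p + rj * q + re * ((n : Int) - 1)).toNat = (m p q).1 ∧
    (ci * p + cj * q + cf * ((n : Int) - 1)).toNat = (m p q).2 ∧
    (m p q).1 < n ∧ (m p q).2 < n

/- membership in B's cell set -/

theorem cells_contains {g : List String} {n : Nat} (i j : Int) :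
    PySem.Set.contains (pvbSharps g (n : Int)) (i, j) = true ↔
      (0 ≤ i ∧ i < (n : Int) ∧ 0 ≤ j ∧ j < (n : Int) ∧ cN g i.toNat j.toNat = '#') := by
  rw [pvbSharps]
  simp only [PySem.Set.contains, PySem.Set.mem_ofList, List.contains_iff_mem,
    List.mem_flatMap, List.mem_filterMap]
  constructor
  · rintro ⟨r, hr, c, hc, hif⟩
    rw [PySem.List.mem_pyRange_one] at hr hc
    split at hif
    · rename_i hch
      simp only [Option.some_inj, Prod.mk.injEq] at hif
      obtain ⟨rfl, rfl⟩ := hif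
      refine ⟨by omega, by omega, by omega, by omega, ?_⟩
      rw [← cell_nonneg g (by omega) (by omega)]
      exact hch
    · exact absurd hif (by simp)
  · rintro ⟨h1, h2, h3, h4, h5⟩
    refine ⟨i, ?_, j, ?_, ?_⟩
    · rw [PySem.List.mem_pyRange_one]; omega
    · rw [PySem.List.mem_pyRange_one]; omega
    · rw [if_pos (by rw [cell_nonneg g h1 h3]; exact h5)]

theorem all_congr_mem {α : Type} {l : List α} {f g : α → Bool}
    (h : ∀ x ∈ l, f x = g x) : l.all f = l.all g := by
  induction l with
  | nil => rfl
  | cons a l ih =>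
    simp only [List.all_cons, h a (by simp), ih (fun x hx => h x (by simp [hx]))]

theorem filterMap_if {α β : Type} (l : List α) (p : α → Bool) (f : α → β) :
    l.filterMap (fun x => if p x then some (f x) else none) = (l.filter p).map f := by
  induction l with
  | nil => rfl
  | cons a l ih => by_cases h : p a <;> simp [h, ih]

/- the normal forms shared by both sides: positions, hits, covered set, marked grid -/

def pvP (n : Nat) : List (Int × Int) :=
  (PySem.List.pyRange 0 ((n : Int) - 2) 1).flatMap (fun r =>
    (PySem.List.pyRange 0 ((n : Int) - 19) 1).map (fun c => (r, c)))

def hitsN (t : List String) (n : Nat) : List (Int × Int) :=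
  (pvP n).filter
    (fun rc => pvMonsterCoords.all (fun d => pvCell t (rc.1 + d.1) (rc.2 + d.2) == '#'))

def coveredOf (hits : List (Int × Int)) : PySem.Set (Int × Int) :=
  PySem.Set.ofList (hits.flatMap (fun rc => pvLM.map (fun d => (rc.1 + d.1, rc.2 + d.2))))

def mkd (t : List String) (n : Nat) (cov : PySem.Set (Int × Int)) : List String :=
  (List.range n).map (fun (i : Nat) => String.ofList ((List.range n).map (fun (j : Nat) =>
    if PySem.Set.contains cov ((i : Int), (j : Int)) then 'O' else cN t i j)))

/- B's per-orientation hit test equals A's, through the affine map -/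

theorem hit_test_eqB {g : List String} {n : Nat}
    {ri rj re ci cj cf : Int} {m : Nat → Nat → Nat × Nat}
    (hc : Compat n ri rj re ci cj cf m) {r c : Int}
    (hr : 0 ≤ r) (hr2 : r + 2 < (n : Int)) (hc0 : 0 ≤ c) (hc2 : c + 19 < (n : Int)) :
    ((pvbOffsets.map (fun d => (ri * d.1 + rj * d.2, ci * d.1 + cj * d.2))).all
      (fun s => PySem.Set.contains (pvbSharps g (n : Int))
        (ri * r + rj * c + re * ((n : Int) - 1) + s.1,
         ci * r + cj * c + cf * ((n : Int) - 1) + s.2)))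
      = (pvMonsterCoords.all (fun d => pvCell (fG g n m) (r + d.1) (c + d.2) == '#')) := by
  rw [List.all_map, off_eq, mc_eq]
  apply all_congr_mem
  intro d hd
  obtain ⟨b1, b2, b3, b4⟩ := LM_bounds d hd
  simp only [Function.comp_apply]
  have e1 : ri * r + rj * c + re * ((n : Int) - 1) + (ri * d.1 + rj * d.2)
      = ri * (r + d.1) + rj * (c + d.2) + re * ((n : Int) - 1) := by ring
  have e2 : ci * r + cj * c + cf * ((n : Int) - 1) + (ci * d.1 + cj * d.2)
      = ci * (r + d.1) + cj * (c + d.2) + cf * ((n : Int) - 1) := by ring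
  rw [e1, e2]
  have hi : (0 : Int) ≤ r + d.1 := by omega
  have hj : (0 : Int) ≤ c + d.2 := by omega
  have hi' : r + d.1 = (((r + d.1).toNat : Nat) : Int) := by omega
  have hj' : c + d.2 = (((c + d.2).toNat : Nat) : Int) := by omega
  obtain ⟨h1, h2, h3, h4, h5, h6⟩ := hc (r + d.1).toNat (c + d.2).toNat (by omega) (by omega)
  rw [hi', hj']
  rw [cell_nonneg (fG g n m) (by positivity) (by positivity)]
  simp only [Int.toNat_natCast]
  rw [cN_fG g n m (by omega) (by omega)]
  by_cases hch : cN g (m (r + d.1).toNat (c + d.2).toNat).1 (m (r + d.1).toNat (c + d.2).toNat).2 = '#'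
  · have hcon : PySem.Set.contains (pvbSharps g (n : Int))
        (ri * ((r + d.1).toNat : Int) + rj * ((c + d.2).toNat : Int) + re * ((n : Int) - 1),
         ci * ((r + d.1).toNat : Int) + cj * ((c + d.2).toNat : Int) + cf * ((n : Int) - 1)) = true := by
      refine (cells_contains _ _).mpr ⟨h1, by omega, h2, by omega, ?_⟩
      rw [h3, h4]; exact hch
    rw [hcon]
    simp [hch]
  · have hcon : ¬ PySem.Set.contains (pvbSharps g (n : Int))
        (ri * ((r + d.1).toNat : Int) + rj * ((c + d.2).toNat : Int) + re * ((n : Int) - 1),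
         ci * ((r + d.1).toNat : Int) + cj * ((c + d.2).toNat : Int) + cf * ((n : Int) - 1)) = true := by
      intro hcon
      have := ((cells_contains _ _).mp hcon).2.2.2.2
      rw [h3, h4] at this
      exact hch this
    simp only [Bool.not_eq_true] at hcon
    rw [hcon]
    simp [hch]

theorem hitsB_eq {g : List String} {n : Nat}
    {ri rj re ci cj cf : Int} {m : Nat → Nat → Nat × Nat}
    (hc : Compat n ri rj re ci cj cf m) :
    ((PySem.List.pyRange 0 ((n : Int) - 2) 1).flatMap (fun r =>
      (PySem.List.pyRange 0 ((n : Int) - 19) 1).filterMap (fun c =>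
        if (pvbOffsets.map (fun d => (ri * d.1 + rj * d.2, ci * d.1 + cj * d.2))).all
            (fun s => PySem.Set.contains (pvbSharps g (n : Int))
              (ri * r + rj * c + re * ((n : Int) - 1) + s.1,
               ci * r + cj * c + cf * ((n : Int) - 1) + s.2))
        then some (r, c) else none)))
      = hitsN (fG g n m) n := by
  rw [hitsN, pvP, List.filter_flatMap]
  apply List.flatMap_congr
  intro r hr
  rw [PySem.List.mem_pyRange_one] at hr
  rw [filterMap_if, List.filter_map]
  congr 1
  apply List.filter_congr
  intro c hc'
  rw [PySem.List.mem_pyRange_one] at hc'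
  simp only [Function.comp_apply]
  exact hit_test_eqB hc (by omega) (by omega) (by omega) (by omega)

/- A's per-orientation scan in the shared normal form -/

theorem scanOne_eq_foldP (t : List String) (n : Nat) :
    pvScanOne (n : Int) (n : Int) 3 20 t =
      ((pvP n).foldl (fun acc x =>
          if pvMonsterCoords.all (fun d => pvCell t (x.1 + d.1) (x.2 + d.2) == '#') then acc + 1
          else acc) 0,
       (pvP n).foldl (fun m x =>
          if pvMonsterCoords.all (fun d => pvCell t (x.1 + d.1) (x.2 + d.2) == '#') then
            pvMonsterCoords.foldl (fun m d => pvMarkOne m (x.1 + d.1) (x.2 + d.2)) m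
          else m) (t.map (fun row => row.toList))) := by
  rw [pvScanOne, show (n : Int) - 3 + 1 = (n : Int) - 2 by ring,
    show (n : Int) - 20 + 1 = (n : Int) - 19 by ring]
  rw [← PySem.List.foldl_prod_mk
    (f := fun acc (x : Int × Int) =>
      if pvMonsterCoords.all (fun d => pvCell t (x.1 + d.1) (x.2 + d.2) == '#') then acc + 1
      else acc)
    (g := fun m (x : Int × Int) =>
      if pvMonsterCoords.all (fun d => pvCell t (x.1 + d.1) (x.2 + d.2) == '#') then
        pvMonsterCoords.foldl (fun m d => pvMarkOne m (x.1 + d.1) (x.2 + d.2)) m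
      else m)]
  rw [pvP, List.foldl_flatMap]
  simp only [List.foldl_map]
  apply PySem.List.foldl_congr_mem
  intro acc r hr
  apply PySem.List.foldl_congr_mem
  intro acc' c hc
  by_cases h : pvMonsterCoords.all (fun d => pvCell t (r + d.1) (c + d.2) == '#') <;>
    simp [h]

theorem scanOne_count (t : List String) (n : Nat) :
    (pvScanOne (n : Int) (n : Int) 3 20 t).1 = ((hitsN t n).length : Int) := by
  rw [scanOne_eq_foldP, hitsN]
  simp only
  rw [PySem.List.foldl_if_add_one]
  simp [List.countP_eq_length_filter]

def mgc (m : List (List Char)) (p q : Nat) : Char := (m.getD p []).getD q ' '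
def Md (m : List (List Char)) (n : Nat) : Prop := m.length = n ∧ ∀ row ∈ m, row.length = n

theorem mgc_eq_getElem {m : List (List Char)} {p q : Nat} (hp : p < m.length)
    (hq : q < m[p].length) : mgc m p q = m[p][q] := by
  simp [mgc, List.getD_eq_getElem?_getD, List.getElem?_eq_getElem hp,
    List.getElem?_eq_getElem hq]

theorem markOne_Md {m : List (List Char)} {n : Nat} (hm : Md m n) (i j : Int) :
    Md (pvMarkOne m i j) n := by
  obtain ⟨hl, hr⟩ := hm
  refine ⟨by simp [pvMarkOne, hl], ?_⟩
  intro row hrow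
  rw [pvMarkOne, List.mem_iff_getElem] at hrow
  obtain ⟨k, hk, rfl⟩ := hrow
  rw [List.length_modify] at hk
  rw [List.getElem_modify]
  split
  · rw [List.length_set]
    exact hr _ (List.getElem_mem _)
  · exact hr _ (List.getElem_mem _)

theorem markOne_mg {m : List (List Char)} {n : Nat} (hm : Md m n) {i j : Int}
    (hi0 : 0 ≤ i) (hi : i < (n : Int)) (hj0 : 0 ≤ j) (hj : j < (n : Int)) (p q : Nat) :
    mgc (pvMarkOne m i j) p q = if i.toNat = p ∧ j.toNat = q then 'O' else mgc m p q := by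
  obtain ⟨hl, hr⟩ := hm
  by_cases hip : i.toNat = p
  · subst hip
    have hpl : i.toNat < m.length := by omega
    have hrow : m[i.toNat].length = n := hr _ (List.getElem_mem _)
    have hmod : (pvMarkOne m i j).getD i.toNat [] = (m[i.toNat]'hpl).set j.toNat 'O' := by
      rw [pvMarkOne, List.getD_eq_getElem?_getD, List.getElem?_modify,
        List.getElem?_eq_getElem hpl]
      simp
    rw [mgc, hmod]
    by_cases hjq : j.toNat = q
    · subst hjq
      rw [List.getD_eq_getElem?_getD, List.getElem?_set, if_pos rfl, if_pos (by omega)]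
      simp
    · rw [List.getD_eq_getElem?_getD, List.getElem?_set, if_neg hjq,
        if_neg (by simp [hjq])]
      rw [mgc, List.getD_eq_getElem?_getD, List.getD_eq_getElem?_getD,
        List.getElem?_eq_getElem hpl]
      rfl
  · have hmod : (pvMarkOne m i j).getD p [] = m.getD p [] := by
      rw [pvMarkOne, List.getD_eq_getElem?_getD, List.getD_eq_getElem?_getD,
        List.getElem?_modify]
      cases m[p]? <;> simp [hip]
    rw [mgc, mgc, hmod, if_neg (by tauto)]

theorem setAll_Md {n : Nat} : ∀ (ps : List (Int × Int)) (m : List (List Char)), Md m n →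
    Md (ps.foldl (fun m x => pvMarkOne m x.1 x.2) m) n := by
  intro ps
  induction ps with
  | nil => intro m hm; exact hm
  | cons x ps ih =>
    intro m hm
    exact ih _ (markOne_Md hm x.1 x.2)

theorem setAll_mg {n : Nat} : ∀ (ps : List (Int × Int)) (m : List (List Char)),
    (∀ x ∈ ps, 0 ≤ x.1 ∧ x.1 < (n : Int) ∧ 0 ≤ x.2 ∧ x.2 < (n : Int)) → Md m n →
    ∀ p q : Nat,
    mgc (ps.foldl (fun m x => pvMarkOne m x.1 x.2) m) p q =
      if (((p : Int), (q : Int)) ∈ ps) then 'O' else mgc m p q := by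
  intro ps
  induction ps with
  | nil => intro m hb hm p q; simp
  | cons x ps ih =>
    intro m hb hm p q
    obtain ⟨h1, h2, h3, h4⟩ := hb x (by simp)
    rw [List.foldl_cons,
      ih _ (fun y hy => hb y (by simp [hy])) (markOne_Md hm x.1 x.2) p q,
      markOne_mg hm h1 h2 h3 h4 p q]
    by_cases hmem : (((p : Int), (q : Int)) ∈ ps)
    · simp [hmem]
    · simp only [if_neg hmem]
      by_cases hx : x.1.toNat = p ∧ x.2.toNat = q
      · have : x = (((p : Int), (q : Int))) := by
          obtain ⟨ha, hb'⟩ := hx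
          exact Prod.ext (by omega) (by omega)
        simp [this]
      · have hxne : x ≠ (((p : Int), (q : Int))) := by
          intro hcon
          subst hcon
          simp at hx
        rw [if_neg hx, if_neg (by
          simp only [List.mem_cons]
          rintro (hcon | hcon)
          · exact hxne hcon.symm
          · exact hmem hcon)]

theorem hits_bounds {t : List String} {n : Nat} :
    ∀ x ∈ hitsN t n, 0 ≤ x.1 ∧ x.1 + 2 < (n : Int) ∧ 0 ≤ x.2 ∧ x.2 + 19 < (n : Int) := by
  intro x hx
  rw [hitsN] at hx
  have hxm := (List.mem_filter.mp hx).1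
  rw [pvP] at hxm
  simp only [List.mem_flatMap, List.mem_map] at hxm
  obtain ⟨r, hr, c, hc, rfl⟩ := hxm
  rw [PySem.List.mem_pyRange_one] at hr hc
  exact ⟨by omega, by omega, by omega, by omega⟩

theorem mgc_m0 (t : List String) (p q : Nat) :
    mgc (t.map (fun row => row.toList)) p q = cN t p q := by
  cases h : t[p]? with
  | none => simp [mgc, cN, List.getD_eq_getElem?_getD, List.getElem?_map, h]
  | some s => simp [mgc, cN, List.getD_eq_getElem?_getD, List.getElem?_map, h]

theorem scanOne_marked {t : List String} {n : Nat} (ht : Sq t n) :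
    (pvScanOne (n : Int) (n : Int) 3 20 t).2.map (fun row => String.ofList row) =
      mkd t n (coveredOf (hitsN t n)) := by
  obtain ⟨htl, htr⟩ := ht
  have ht' : Sq t n := ⟨htl, htr⟩
  rw [scanOne_eq_foldP]
  simp only
  rw [PySem.List.foldl_if_eq_foldl_filter, mc_eq]
  have hfilter : (pvP n).filter
      (fun rc => pvLM.all (fun d => pvCell t (rc.1 + d.1) (rc.2 + d.2) == '#'))
      = hitsN t n := by rw [hitsN, mc_eq]
  rw [hfilter]
  set hits := hitsN t n with hhits
  set cov := hits.flatMap (fun rc => pvLM.map (fun d => (rc.1 + d.1, rc.2 + d.2))) with hcov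
  have hflat : hits.foldl
      (fun m rc => pvLM.foldl (fun m d => pvMarkOne m (rc.1 + d.1) (rc.2 + d.2)) m)
      (t.map (fun row => row.toList)) =
      cov.foldl (fun m y => pvMarkOne m y.1 y.2) (t.map (fun row => row.toList)) := by
    rw [hcov, List.foldl_flatMap]
    simp only [List.foldl_map]
  rw [hflat]
  have hm0 : Md (t.map (fun row => row.toList)) n :=
    ⟨by simp [htl], by intro row hrow; simp at hrow; obtain ⟨s, hs, rfl⟩ := hrow; exact htr s hs⟩
  have hcovb : ∀ y ∈ cov, 0 ≤ y.1 ∧ y.1 < (n : Int) ∧ 0 ≤ y.2 ∧ y.2 < (n : Int) := by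
    intro y hy
    rw [hcov] at hy
    simp only [List.mem_flatMap, List.mem_map] at hy
    obtain ⟨rc, hrc, d, hd, rfl⟩ := hy
    obtain ⟨b1, b2, b3, b4⟩ := hits_bounds rc hrc
    obtain ⟨c1, c2, c3, c4⟩ := LM_bounds d hd
    exact ⟨by omega, by omega, by omega, by omega⟩
  have hM : Md (cov.foldl (fun m y => pvMarkOne m y.1 y.2) (t.map (fun row => row.toList))) n :=
    setAll_Md cov _ hm0
  apply List.ext_getElem (by simp [hM.1, mkd])
  intro p hp hp'
  simp only [List.length_map, hM.1] at hp
  simp only [mkd, List.length_map, List.length_range] at hp'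
  simp only [mkd, List.getElem_map, List.getElem_range]
  congr 1
  have hrowM : ((cov.foldl (fun m y => pvMarkOne m y.1 y.2)
      (t.map (fun row => row.toList)))[p]'(by rw [hM.1]; exact hp)).length = n :=
    hM.2 _ (List.getElem_mem _)
  apply List.ext_getElem (by simp [hrowM])
  intro q hq hq'
  simp only [List.length_map, List.length_range] at hq'
  simp only [List.getElem_map, List.getElem_range]
  rw [show ((cov.foldl (fun m y => pvMarkOne m y.1 y.2)
      (t.map (fun row => row.toList)))[p]'(by rw [hM.1]; exact hp))[q]'hq =
    mgc (cov.foldl (fun m y => pvMarkOne m y.1 y.2) (t.map (fun row => row.toList))) p q from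
    (mgc_eq_getElem (by rw [hM.1]; exact hp) hq).symm]
  rw [setAll_mg cov _ hcovb hm0 p q]
  by_cases hmem : (((p : Int), (q : Int)) ∈ cov)
  · rw [if_pos hmem]
    have : PySem.Set.contains (coveredOf hits) ((p : Int), (q : Int)) = true := by
      simp only [coveredOf, PySem.Set.contains, List.contains_iff_mem, PySem.Set.mem_ofList]
      simpa [hcov] using hmem
    rw [if_pos this]
  · rw [if_neg hmem]
    have : ¬ PySem.Set.contains (coveredOf hits) ((p : Int), (q : Int)) = true := by
      simp only [coveredOf, PySem.Set.contains, List.contains_iff_mem, PySem.Set.mem_ofList]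
      simpa [hcov] using hmem
    simp only [Bool.not_eq_true] at this
    rw [this]
    simp only [if_false, Bool.false_eq_true]
    rw [mgc_m0]

/- B's winner rendering in the shared normal form -/

theorem outB_eq {g : List String} {n : Nat}
    {ri rj re ci cj cf : Int} {m : Nat → Nat → Nat × Nat}
    (hc : Compat n ri rj re ci cj cf m) (cov : PySem.Set (Int × Int)) :
    ((PySem.List.pyRange 0 ((n : Nat) : Int) 1).map (fun i =>
      String.ofList ((PySem.List.pyRange 0 ((n : Nat) : Int) 1).map (fun j =>
        if PySem.Set.contains cov (i, j) then 'O'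
        else pvCell g (ri * i + rj * j + re * ((n : Int) - 1))
          (ci * i + cj * j + cf * ((n : Int) - 1))))))
      = mkd (fG g n m) n cov := by
  rw [PySem.List.pyRange_one, mkd]
  have hn : (((n : Nat) : Int) - 0).toNat = n := by omega
  rw [hn]
  simp only [List.map_map]
  apply List.map_congr_left
  intro p hp
  rw [List.mem_range] at hp
  simp only [Function.comp_apply]
  congr 1
  apply List.map_congr_left
  intro q hq
  rw [List.mem_range] at hq
  simp only [Function.comp_apply, zero_add]
  obtain ⟨h1, h2, h3, h4, h5, h6⟩ := hc p q hp hq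
  congr 1
  rw [cell_nonneg g h1 h2, h3, h4, cN_fG g n m hp hq]

/- one step of B's loop equals one step of A's scan -/

theorem scanAll_cons (grid : List String) (h w : Int) (t : List String)
    (ts : List (List String)) :
    pvScanAll grid h w 3 20 (t :: ts) =
      if (pvScanOne h w 3 20 t).1 > 0 then
        ((pvScanOne h w 3 20 t).1, (pvScanOne h w 3 20 t).2.map (fun row => String.ofList row))
      else pvScanAll grid h w 3 20 ts := by
  rw [pvScanAll]

theorem go_cons {grid : List String} {n : Nat}
    (ri rj re ci cj cf : Int) (Ms : List (Int × Int × Int × Int × Int × Int))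
    (m : Nat → Nat → Nat × Nat) (hc : Compat n ri rj re ci cj cf m) :
    pvbGo grid (n : Int) (n : Int) (n : Int) (pvbSharps grid (n : Int)) ((ri, rj, re, ci, cj, cf) :: Ms) =
      if (pvScanOne (n : Int) (n : Int) 3 20 (fG grid n m)).1 > 0 then
        ((pvScanOne (n : Int) (n : Int) 3 20 (fG grid n m)).1,
         (pvScanOne (n : Int) (n : Int) 3 20 (fG grid n m)).2.map (fun row => String.ofList row))
      else pvbGo grid (n : Int) (n : Int) (n : Int) (pvbSharps grid (n : Int)) Ms := by
  simp only [pvbGo]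
  rw [hitsB_eq hc]
  rw [scanOne_count (fG grid n m) n, scanOne_marked (Sq_fG grid n m)]
  by_cases hpos : (hitsN (fG grid n m) n).length > 0
  · have hne : ¬ (hitsN (fG grid n m) n).isEmpty = true := by
      simp [List.isEmpty_iff]
      exact List.length_pos_iff.mp hpos
    have hgt : ((hitsN (fG grid n m) n).length : Int) > 0 := by exact_mod_cast hpos
    rw [if_neg hne, if_pos hgt]
    rw [off_eq]
    have hcov : PySem.Set.ofList ((hitsN (fG grid n m) n).flatMap (fun rc =>
        pvLM.map (fun d => (rc.1 + d.1, rc.2 + d.2)))) = coveredOf (hitsN (fG grid n m) n) := by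
      rw [coveredOf]
    rw [hcov]
    exact congrArg _ (outB_eq hc (coveredOf (hitsN (fG grid n m) n)))
  · have hlen0 : (hitsN (fG grid n m) n).length = 0 := by omega
    have hemp : (hitsN (fG grid n m) n).isEmpty = true := by
      simp [List.isEmpty_iff]
      exact List.length_eq_zero_iff.mp hlen0
    have hngt : ¬ ((hitsN (fG grid n m) n).length : Int) > 0 := by
      intro hcon; exact hpos (by exact_mod_cast hcon)
    rw [if_pos hemp, if_neg hngt]

/- dedup is redundant for a first-positive search -/

def dedupFrom (seen : List (List String)) : List (List String) → List (List String)
  | [] => []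
  | c :: cs => if c ∈ seen then dedupFrom seen cs else c :: dedupFrom (seen ++ [c]) cs

theorem dedup_foldl (cs : List (List String)) : ∀ seen,
    cs.foldl (fun u c => if c ∈ u then u else u ++ [c]) seen = seen ++ dedupFrom seen cs := by
  induction cs with
  | nil => intro seen; simp [dedupFrom]
  | cons c cs ih =>
    intro seen
    by_cases h : c ∈ seen
    · simp [dedupFrom, h, ih]
    · simp [dedupFrom, h, ih (seen ++ [c])]

theorem scanAll_dedup (grid : List String) (h w : Int) :
    ∀ (cs : List (List String)) (seen : List (List String)),
      (∀ t ∈ seen, ¬ (pvScanOne h w 3 20 t).1 > 0) →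
      pvScanAll grid h w 3 20 (dedupFrom seen cs) = pvScanAll grid h w 3 20 cs := by
  intro cs
  induction cs with
  | nil => intro seen _; rfl
  | cons c cs ih =>
    intro seen hseen
    rw [dedupFrom]
    by_cases hmem : c ∈ seen
    · rw [if_pos hmem, scanAll_cons, if_neg (hseen c hmem)]
      exact ih seen hseen
    · rw [if_neg hmem, scanAll_cons, scanAll_cons]
      by_cases hpos : (pvScanOne h w 3 20 c).1 > 0
      · rw [if_pos hpos, if_pos hpos]
      · rw [if_neg hpos, if_neg hpos]
        refine ih (seen ++ [c]) ?_
        intro t ht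
        rcases List.mem_append.mp ht with ht | ht
        · exact hseen t ht
        · rw [List.mem_singleton.mp ht]; exact hpos

/- degenerate sizes: no position is ever scanned -/

theorem scanOne_degenerate {h w : Int} (hd : h - 3 + 1 ≤ 0 ∨ w - 20 + 1 ≤ 0) (t : List String) :
    (pvScanOne h w 3 20 t).1 = 0 := by
  rw [pvScanOne]
  rcases hd with hd | hd
  · rw [PySem.List.pyRange_one_eq_nil (show h - 3 + 1 ≤ 0 from hd)]
    rfl
  · simp only [PySem.List.pyRange_one_eq_nil (show w - 20 + 1 ≤ 0 from hd), List.foldl_nil]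
    rw [PySem.List.foldl_ignore]

theorem scanAll_degenerate (grid : List String) {h w : Int}
    (hd : h - 3 + 1 ≤ 0 ∨ w - 20 + 1 ≤ 0) (ts : List (List String)) :
    pvScanAll grid h w 3 20 ts = (0, grid) := by
  induction ts with
  | nil => rfl
  | cons t ts ih =>
    rw [pvScanAll]
    simp only [scanOne_degenerate hd t]
    norm_num [ih]

theorem go_degenerate (grid : List String) {h w : Int} (n : Int) (s : PySem.Set (Int × Int))
    (hd : h - 2 ≤ 0 ∨ w - 19 ≤ 0) (Ms : List (Int × Int × Int × Int × Int × Int)) :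
    pvbGo grid h w n s Ms = (0, grid) := by
  induction Ms with
  | nil => rfl
  | cons M Ms ih =>
    obtain ⟨ri, rj, re, ci, cj, cf⟩ := M
    simp only [pvbGo]
    have hnil : ((PySem.List.pyRange 0 (h - 2) 1).flatMap (fun r =>
        (PySem.List.pyRange 0 (w - 19) 1).filterMap (fun c =>
          if (pvbOffsets.map (fun d => (ri * d.1 + rj * d.2, ci * d.1 + cj * d.2))).all
              (fun sh => PySem.Set.contains s
                (ri * r + rj * c + re * (n - 1) + sh.1, ci * r + cj * c + cf * (n - 1) + sh.2))
          then some (r, c) else none))) = [] := by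
      rcases hd with hd | hd
      · rw [PySem.List.pyRange_one_eq_nil (show h - 2 ≤ 0 from hd)]
        simp
      · simp [PySem.List.pyRange_one_eq_nil (show w - 19 ≤ 0 from hd)]
    rw [hnil]
    simpa using ih

/- the candidate list of A as formula grids, and the compatibility of each map -/

theorem width_eq {grid : List String} (hne : grid ≠ []) :
    PySem.Str.len (PySem.List.pyGetD grid 0 "") = ((grid.headD "").toList.length : Int) := by
  cases grid with
  | nil => exact absurd rfl hne
  | cons a l =>
    rw [PySem.List.pyGetD, PySem.List.pyGet?_zero_cons]
    simp

theorem mh_eq : ((pvMONSTER.length : Nat) : Int) = 3 := by decide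

theorem mw_eq : PySem.Str.len (PySem.List.pyGetD pvMONSTER 0 "") = 20 := by decide

theorem flip_fG {g x : List String} {n : Nat} (m m' : Nat → Nat → Nat × Nat)
    (hx : x = fG g n m)
    (hm' : ∀ p q : Nat, p < n → q < n → m p (n - 1 - q) = m' p q) :
    pvFlip x = fG g n m' := by
  have sq : Sq x n := hx ▸ Sq_fG g n m
  rw [flip_eq sq, hx, fG_comp m _ (fun p q hp hq => ⟨hp, by omega⟩)]
  exact fG_congr (fun p q hp hq => by rw [hm' p q hp hq])

theorem rot_fG {g x : List String} {n : Nat} (m m' : Nat → Nat → Nat × Nat)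
    (hx : x = fG g n m)
    (hm' : ∀ p q : Nat, p < n → q < n → m (n - 1 - q) p = m' p q) :
    pvRotate x = fG g n m' := by
  have sq : Sq x n := hx ▸ Sq_fG g n m
  rw [rotate_eq x, sq.1, hx, fG_comp m _ (fun p q hp hq => ⟨by omega, hp⟩)]
  exact fG_congr (fun p q hp hq => by rw [hm' p q hp hq])

theorem cands_eq {grid : List String} (hsq : ∀ s ∈ grid, s.toList.length = grid.length) :
    [grid, pvFlip grid, pvRotate grid, pvFlip (pvRotate grid),
     pvRotate (pvRotate grid), pvFlip (pvRotate (pvRotate grid)),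
     pvRotate (pvRotate (pvRotate grid)), pvFlip (pvRotate (pvRotate (pvRotate grid)))] =
      (List.range 8).map (fun k => fG grid grid.length (mN grid.length k)) := by
  set n := grid.length with hn
  have hg : Sq grid n := ⟨rfl, hsq⟩
  have hA0 : grid = fG grid n (fun i j => (i, j)) := (fG_id hg).symm
  have hA1 : pvFlip grid = fG grid n (fun i j => (i, n - 1 - j)) :=
    flip_fG _ _ hA0 (fun p q hp hq => rfl)
  have hA2 : pvRotate grid = fG grid n (fun i j => (n - 1 - j, i)) :=
    rot_fG _ _ hA0 (fun p q hp hq => rfl)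
  have hA3 : pvFlip (pvRotate grid) = fG grid n (fun i j => (j, i)) :=
    flip_fG _ _ hA2 (fun p q hp hq => Prod.ext (by omega) rfl)
  have hA4 : pvRotate (pvRotate grid) = fG grid n (fun i j => (n - 1 - i, n - 1 - j)) :=
    rot_fG _ _ hA2 (fun p q hp hq => rfl)
  have hA5 : pvFlip (pvRotate (pvRotate grid)) = fG grid n (fun i j => (n - 1 - i, j)) :=
    flip_fG _ _ hA4 (fun p q hp hq => Prod.ext rfl (by omega))
  have hA6 : pvRotate (pvRotate (pvRotate grid)) = fG grid n (fun i j => (j, n - 1 - i)) :=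
    rot_fG _ _ hA4 (fun p q hp hq => Prod.ext (by omega) rfl)
  have hA7 : pvFlip (pvRotate (pvRotate (pvRotate grid))) =
      fG grid n (fun i j => (n - 1 - j, n - 1 - i)) :=
    flip_fG _ _ hA6 (fun p q hp hq => rfl)
  have hr8 : List.range 8 = [0, 1, 2, 3, 4, 5, 6, 7] := by decide
  rw [hr8]
  simp only [List.map_cons, List.map_nil]
  rw [hA7, hA6, hA5, hA4, hA3, hA2, hA1]
  exact List.cons_eq_cons.mpr ⟨(fG_id hg).symm, rfl⟩

theorem allT_eq (grid : List String) :
    pvAllTransformations grid = dedupFrom []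
      [grid, pvFlip grid, pvRotate grid, pvFlip (pvRotate grid),
       pvRotate (pvRotate grid), pvFlip (pvRotate (pvRotate grid)),
       pvRotate (pvRotate (pvRotate grid)), pvFlip (pvRotate (pvRotate (pvRotate grid)))] := by
  rw [pvAllTransformations]
  have h4 : List.range 4 = [0, 1, 2, 3] := by decide
  rw [h4]
  simp only [List.foldl_cons, List.foldl_nil]
  rw [dedup_foldl]
  simp

theorem if_step {α : Type} {b : Prop} [Decidable b] {x l r : α} (h : l = r) :
    (if b then x else l) = (if b then x else r) := by rw [h]

theorem compat0 (n : Nat) : Compat n 1 0 0 0 1 0 (mN n 0) := by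
  intro p q hp hq; simp only [mN]; refine ⟨by omega, by omega, by omega, by omega, hp, hq⟩

theorem compat1 (n : Nat) : Compat n 1 0 0 0 (-1) 1 (mN n 1) := by
  intro p q hp hq; simp only [mN]
  refine ⟨by omega, by omega, by omega, by omega, hp, by omega⟩

theorem compat2 (n : Nat) : Compat n 0 (-1) 1 1 0 0 (mN n 2) := by
  intro p q hp hq; simp only [mN]
  refine ⟨by omega, by omega, by omega, by omega, by omega, hp⟩

theorem compat3 (n : Nat) : Compat n 0 1 0 1 0 0 (mN n 3) := by
  intro p q hp hq; simp only [mN]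
  refine ⟨by omega, by omega, by omega, by omega, hq, hp⟩

theorem compat4 (n : Nat) : Compat n (-1) 0 1 0 (-1) 1 (mN n 4) := by
  intro p q hp hq; simp only [mN]
  refine ⟨by omega, by omega, by omega, by omega, by omega, by omega⟩

theorem compat5 (n : Nat) : Compat n (-1) 0 1 0 1 0 (mN n 5) := by
  intro p q hp hq; simp only [mN]
  refine ⟨by omega, by omega, by omega, by omega, by omega, hq⟩

theorem compat6 (n : Nat) : Compat n 0 1 0 (-1) 0 1 (mN n 6) := by
  intro p q hp hq; simp only [mN]
  refine ⟨by omega, by omega, by omega, by omega, hq, by omega⟩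

theorem compat7 (n : Nat) : Compat n 0 (-1) 1 (-1) 0 1 (mN n 7) := by
  intro p q hp hq; simp only [mN]
  refine ⟨by omega, by omega, by omega, by omega, by omega, by omega⟩

theorem goAll {grid : List String} {n : Nat} :
    pvbGo grid (n : Int) (n : Int) (n : Int) (pvbSharps grid (n : Int)) pvbMaps =
      pvScanAll grid (n : Int) (n : Int) 3 20
        ((List.range 8).map (fun k => fG grid n (mN n k))) := by
  have hr8 : List.range 8 = [0, 1, 2, 3, 4, 5, 6, 7] := by decide
  rw [hr8]
  simp only [List.map_cons, List.map_nil]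
  rw [show pvbMaps = [(1, 0, 0, 0, 1, 0), (1, 0, 0, 0, -1, 1), (0, -1, 1, 1, 0, 0),
    (0, 1, 0, 1, 0, 0), (-1, 0, 1, 0, -1, 1), (-1, 0, 1, 0, 1, 0), (0, 1, 0, -1, 0, 1),
    (0, -1, 1, -1, 0, 1)] from rfl]
  rw [go_cons _ _ _ _ _ _ _ (mN n 0) (compat0 n), scanAll_cons]
  apply if_step
  rw [go_cons _ _ _ _ _ _ _ (mN n 1) (compat1 n), scanAll_cons]
  apply if_step
  rw [go_cons _ _ _ _ _ _ _ (mN n 2) (compat2 n), scanAll_cons]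
  apply if_step
  rw [go_cons _ _ _ _ _ _ _ (mN n 3) (compat3 n), scanAll_cons]
  apply if_step
  rw [go_cons _ _ _ _ _ _ _ (mN n 4) (compat4 n), scanAll_cons]
  apply if_step
  rw [go_cons _ _ _ _ _ _ _ (mN n 5) (compat5 n), scanAll_cons]
  apply if_step
  rw [go_cons _ _ _ _ _ _ _ (mN n 6) (compat6 n), scanAll_cons]
  apply if_step
  rw [go_cons _ _ _ _ _ _ _ (mN n 7) (compat7 n), scanAll_cons]
  apply if_step
  rfl

-- ===== VERDICT (by name: the statement is the Claim_ definition above) =====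
theorem count_monsters_spec : Claim_equal_count_monsters := by
  intro grid _ hpre
  obtain ⟨hne, hge, hcase⟩ := hpre
  rw [Spec_count_monsters, count_monsters, count_monsters_alt, mh_eq, mw_eq, width_eq hne]
  rcases hcase with hsq | hsmall | hsmall
  · -- square grid
    set n := grid.length with hn
    have hw : ((grid.headD "").toList.length : Int) = (n : Int) := by
      have : grid.headD "" ∈ grid := by
        cases grid with
        | nil => exact absurd rfl hne
        | cons a l => simp
      have h2 := hsq _ this
      exact_mod_cast h2
    rw [hw, allT_eq, cands_eq hsq,
      scanAll_dedup grid (n : Int) (n : Int) _ [] (by intro t ht; simp at ht),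
      goAll]
  · -- fewer than 3 rows
    rw [scanAll_degenerate grid (by left; omega) _,
      go_degenerate grid _ _ (by left; omega) _]
  · -- first row shorter than 20
    rw [scanAll_degenerate grid (by right; omega) _,
      go_degenerate grid _ _ (by right; omega) _]
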